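-- pv_equiv track=rewrite | github.com/kobejohn/pixeltree | pixeltree.py | _heights
-- ===== SOURCE A (Python) =====
-- from collections import deque
--
-- def _traverse_tree(root, edges):
--     q = deque()
--     q.append((None, root, 0))  # start depth zero
--     while q:
--         parent, point, depth = q.pop()
--         q.extend((point, n, depth+1) for n in edges[point] if n != parent)
--         yield point, depth, parent
--
-- def _is_leaf(node, edges):
--     return len(edges[node]) <= 1
--
-- def _heights(root, edges):
--     bottom_up_nodes = reversed(list(_traverse_tree(root, edges)))
--     heights = dict()
--     for point, depth, parent in bottom_up_nodes:
--         # set subtree depth 0 for leaves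
--         if _is_leaf(point, edges):
--             heights[point] = 0
--         # ignore the root
--         if parent is None:
--             continue
--         # set/reset/ignore parent
--         current_height = heights[point]
--         heights[parent] = max(1+current_height,
--                               heights.get(parent, 0))
--     return heights
-- ===== SOURCE B (Python) =====
-- def _heights(root, edges):
--     # one recursive post-order DFS; updates the heights dict in place
--     heights = {}
--
--     def _visit(node, parent):
--         for n in edges[node]:
--             if n != parent:
--                 _visit(n, node)
--         if len(edges[node]) <= 1:
--             heights[node] = 0
--         if parent is not None:
--             heights[parent] = max(1 + heights[node], heights.get(parent, 0))
--
--     _visit(root, None)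
--     return heights
-- ===== Notes on version B (the rewrite author's own statement) =====
-- stated objective: simpler
-- what changed: replaces A's three-part pipeline (explicit deque stack traversal generator, materialised list + reversed(), then a separate bottom-up dict loop) by a single recursive post-order DFS that updates the heights dict in place as each subtree completes
import Mathlib
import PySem

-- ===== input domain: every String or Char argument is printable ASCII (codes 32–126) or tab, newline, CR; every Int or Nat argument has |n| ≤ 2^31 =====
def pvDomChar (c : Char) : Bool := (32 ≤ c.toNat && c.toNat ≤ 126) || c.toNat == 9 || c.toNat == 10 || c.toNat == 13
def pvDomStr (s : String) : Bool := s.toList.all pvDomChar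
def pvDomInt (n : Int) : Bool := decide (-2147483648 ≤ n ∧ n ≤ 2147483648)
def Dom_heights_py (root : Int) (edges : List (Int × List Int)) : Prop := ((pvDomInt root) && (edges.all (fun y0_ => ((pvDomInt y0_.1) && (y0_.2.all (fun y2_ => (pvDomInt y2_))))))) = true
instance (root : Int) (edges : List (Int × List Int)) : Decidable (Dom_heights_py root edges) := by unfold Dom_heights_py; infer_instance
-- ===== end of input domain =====

-- B replaces A's deque-traversal + reversed-list second pass by one recursive post-order DFS
-- updating the dict in place (objective: simpler). Equality is about the returned dict as an
-- insertion-ordered association list; neither version mutates its arguments.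

-- ===== PORT A =====
-- edges[v]: first-match association lookup; Python raises KeyError when v is absent (excluded by Pre_)
def pvAdjA (e : List (Int × List Int)) (v : Int) : List Int :=
  ((e.find? (fun kv => kv.1 == v)).map (·.2)).getD []

-- the while-q loop of _traverse_tree; stack head = deque's right end (pop side); the Nat fuel is a
-- totality guard only — outside Pre_ the Python loops forever or raises, inside Pre_ it is never exhausted
def pvTravA (e : List (Int × List Int)) : Nat → List (Option Int × Int × Int) → List (Int × Int × Option Int)
  | _, [] => []
  | 0, _ => []
  | f + 1, (parent, point, depth) :: rest =>
      (point, depth, parent) ::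
        pvTravA e f ((((pvAdjA e point).filter (fun n => parent != some n)).map
          (fun n => (some point, n, depth + 1))).reverse ++ rest)

-- the body of A's for-loop over the bottom-up nodes (heights[point] raises KeyError when absent: excluded by Pre_)
def pvStepA (e : List (Int × List Int)) (h : PySem.Dict Int Int) (t : Int × Int × Option Int) :
    PySem.Dict Int Int :=
  let point := t.1
  let h1 := if (pvAdjA e point).length ≤ 1 then h.insert point 0 else h
  match t.2.2 with
  | none => h1
  | some parent => h1.insert parent (max (1 + h1.getD point 0) (h1.getD parent 0))

def pvSZA (e : List (Int × List Int)) : Nat := e.length + (e.map (·.2.length)).sum + 1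

def heights_py (root : Int) (edges : List (Int × List Int)) : List (Int × Int) :=
  ((pvTravA edges ((pvSZA edges + 1) ^ (pvSZA edges + 2)) [(none, root, 0)]).reverse.foldl
    (pvStepA edges) PySem.Dict.empty).items

-- ===== PORT B =====
def pvAdjB (e : List (Int × List Int)) (v : Int) : List Int :=
  ((e.find? (fun kv => kv.1 == v)).map (·.2)).getD []

def pvSZB (e : List (Int × List Int)) : Nat := e.length + (e.map (·.2.length)).sum + 1

-- Source B's _visit(node, parent): recurse into every child first, then the leaf override and the
-- parent update; the Nat fuel (recursion depth) is a totality guard only, never exhausted inside Pre_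
def pvVisitB (e : List (Int × List Int)) : Nat → Option Int → Int → PySem.Dict Int Int → PySem.Dict Int Int
  | 0, _, _, h => h
  | f + 1, parent, node, h =>
      let h1 := ((pvAdjB e node).filter (fun n => parent != some n)).foldl
        (fun h' c => pvVisitB e f (some node) c h') h
      let h2 := if (pvAdjB e node).length ≤ 1 then h1.insert node 0 else h1
      match parent with
      | none => h2
      | some par => h2.insert par (max (1 + h2.getD node 0) (h2.getD par 0))

def heights_py_alt (root : Int) (edges : List (Int × List Int)) : List (Int × Int) :=
  (pvVisitB edges (pvSZB edges + 2) none root PySem.Dict.empty).items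

-- ===== PRECONDITION & SPEC =====
-- Pre_ machinery: the walk's state graph. A state (p, v) is 'the walk is at v, entered from parent p'.
def pvAdjP (e : List (Int × List Int)) (v : Int) : List Int :=
  ((e.find? (fun kv => kv.1 == v)).map (·.2)).getD []

def pvKidsP (e : List (Int × List Int)) (s : Option Int × Int) : List (Option Int × Int) :=
  ((pvAdjP e s.2).filter (fun n => s.1 != some n)).map (fun n => (some s.2, n))

def pvSZP (e : List (Int × List Int)) : Nat := e.length + (e.map (·.2.length)).sum + 1

def pvCP (root : Int) (e : List (Int × List Int)) : List (Option Int × Int) :=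
  (fun C => (C ++ C.flatMap (pvKidsP e)).dedup)^[pvSZP e] [(none, root)]

def pvLookP (t : List ((Option Int × Int) × Nat)) (s : Option Int × Int) : Nat :=
  ((t.find? (fun p => p.1 == s)).map (·.2)).getD 0

def pvRkTP (e : List (Int × List Int)) (C : List (Option Int × Int)) : Nat → List ((Option Int × Int) × Nat)
  | 0 => C.map (fun s => (s, 0))
  | k + 1 =>
      let t := pvRkTP e C k
      C.map (fun s => (s, ((pvKidsP e s).map (fun c => pvLookP t c + 1)).foldr max 0))

def pvRkP (root : Int) (e : List (Int × List Int)) (s : Option Int × Int) : Nat :=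
  pvLookP (pvRkTP e (pvCP root e) (pvSZP e)) s

-- Pre_ excludes exactly the inputs on which A does not return: a KeyError (some walked node is not a
-- key of edges, or a revisited non-leaf node all of whose neighbours equal its walk parent, so
-- heights[point] is read before being set) or divergence (a cycle reachable under parent-skipping,
-- on which the deque loop never empties).
def Pre_heights_py (root : Int) (edges : List (Int × List Int)) : Prop :=
  (none, root) ∈ pvCP root edges ∧
  (∀ s ∈ pvCP root edges, ∀ c ∈ pvKidsP edges s, c ∈ pvCP root edges) ∧
  (∀ s ∈ pvCP root edges, s.2 ∈ edges.map (·.1)) ∧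
  (∀ s ∈ pvCP root edges, ∀ c ∈ pvKidsP edges s, pvRkP root edges c < pvRkP root edges s) ∧
  (∀ s ∈ pvCP root edges, pvRkP root edges s ≤ pvSZP edges) ∧
  (∀ s ∈ pvCP root edges, s.1 = none ∨ (pvAdjP edges s.2).length ≤ 1 ∨ pvKidsP edges s ≠ [])

instance (root : Int) (edges : List (Int × List Int)) : Decidable (Pre_heights_py root edges) := by
  unfold Pre_heights_py; infer_instance

def pvWitness_heights_py : Int × (List (Int × List Int)) := (0, [(0, [1]), (1, [0])])

def Spec_heights_py (root : Int) (edges : List (Int × List Int)) (out : List (Int × Int)) : Prop :=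
  out = heights_py_alt root edges

instance (root : Int) (edges : List (Int × List Int)) (out : List (Int × Int)) :
    Decidable (Spec_heights_py root edges out) := by unfold Spec_heights_py; infer_instance

-- ===== CLAIM (what is proved, stated in full; the proofs are below) =====
def Claim_equal_heights_py : Prop := ∀ (root : Int) (edges : List (Int × List Int)),
  Dom_heights_py root edges → Pre_heights_py root edges →
  Spec_heights_py root edges (heights_py root edges)

-- ===== LEMMAS AND PROOFS =====

theorem pvSZB_eq : pvSZB = pvSZP := rfl
theorem pvSZA_eq : pvSZA = pvSZP := rfl

@[simp] theorem pvTravA_nil (e : List (Int × List Int)) (f : Nat) : pvTravA e f [] = [] := by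
  cases f <;> rfl

-- the inductive property carried by the main lemma: the subtree rooted at state s costs some
-- c ≤ (SZ+1)^(rk s + 1) pops of A's loop, yields a fixed segment Y, and B's recursion applies
-- exactly the fold of A's loop body over Y reversed
def pvGood (root : Int) (e : List (Int × List Int)) (s : Option Int × Int) : Prop :=
  ∃ c : Nat, c ≤ (pvSZP e + 1) ^ (pvRkP root e s + 1) ∧
    ∀ d : Int, ∃ Y : List (Int × Int × Option Int),
      (∀ (f : Nat) (rest : List (Option Int × Int × Int)),
        pvTravA e (f + c) ((s.1, s.2, d) :: rest) = Y ++ pvTravA e f rest) ∧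
      (∀ f : Nat, pvRkP root e s < f → ∀ h : PySem.Dict Int Int,
        pvVisitB e f s.1 s.2 h = Y.reverse.foldl (pvStepA e) h)

theorem pvAdj_len_le (e : List (Int × List Int)) (v : Int) :
    (pvAdjA e v).length ≤ (e.map (·.2.length)).sum := by
  unfold pvAdjA
  cases hf : e.find? (fun kv => kv.1 == v) with
  | none => simp
  | some kv =>
      simp only [Option.map_some, Option.getD_some]
      have hm : kv ∈ e := List.mem_of_find?_eq_some hf
      have : kv.2.length ∈ e.map (·.2.length) := List.mem_map_of_mem hm
      exact List.single_le_sum (fun x _ => Nat.zero_le x) _ this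

theorem pvListGood (root : Int) (e : List (Int × List Int)) (v : Int) (R K : Nat)
    (l : List Int)
    (hc : ∀ n ∈ l, pvGood root e (some v, n))
    (hb : ∀ n ∈ l, (pvSZP e + 1) ^ (pvRkP root e (some v, n) + 1) ≤ K)
    (hr : ∀ n ∈ l, pvRkP root e (some v, n) < R) :
    ∃ cl : Nat, cl ≤ l.length * K ∧ ∀ d : Int, ∃ YL : List (Int × Int × Option Int),
      (∀ (f : Nat) (rest : List (Option Int × Int × Int)),
        pvTravA e (f + cl) ((l.map (fun n => (some v, n, d))).reverse ++ rest) = YL ++ pvTravA e f rest) ∧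
      (∀ f : Nat, R ≤ f → ∀ h : PySem.Dict Int Int,
        l.foldl (fun h' c => pvVisitB e f (some v) c h') h = YL.reverse.foldl (pvStepA e) h) := by
  induction l with
  | nil =>
      refine ⟨0, Nat.zero_le _, fun d => ⟨[], fun f rest => by simp, fun f _ h => by simp⟩⟩
  | cons n l' ih =>
      obtain ⟨cc, hcc, hGn⟩ := hc n (List.mem_cons_self ..)
      obtain ⟨cl', hcl', hL'⟩ := ih
        (fun m hm => hc m (List.mem_cons_of_mem _ hm))
        (fun m hm => hb m (List.mem_cons_of_mem _ hm))
        (fun m hm => hr m (List.mem_cons_of_mem _ hm))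
      refine ⟨cc + cl', ?_, fun d => ?_⟩
      · have h1 : cc ≤ K := le_trans hcc (hb n (List.mem_cons_self ..))
        have := Nat.add_le_add h1 hcl'
        calc cc + cl' ≤ K + l'.length * K := this
          _ = (n :: l').length * K := by simp [Nat.succ_mul, Nat.add_comm]
      · obtain ⟨Yc, hYcA, hYcB⟩ := hGn d
        obtain ⟨YL', hA', hB'⟩ := hL' d
        refine ⟨YL' ++ Yc, fun f rest => ?_, fun f hf h => ?_⟩
        · have hfuel : f + (cc + cl') = (f + cc) + cl' := by omega
          rw [hfuel]
          simp only [List.map_cons, List.reverse_cons, List.append_assoc, List.singleton_append]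
          rw [hA' (f + cc) ((some v, n, d) :: rest)]
          rw [show ((some v, n, d) : Option Int × Int × Int) = (((some v, n) : Option Int × Int).1, ((some v, n) : Option Int × Int).2, d) from rfl]
          rw [hYcA f rest]
        · simp only [List.foldl_cons]
          rw [hYcB f (lt_of_lt_of_le (hr n (List.mem_cons_self ..)) hf)]
          rw [hB' f hf]
          simp [List.foldl_append]

theorem pvStepGood (root : Int) (e : List (Int × List Int)) (hPre : Pre_heights_py root e)
    (s : Option Int × Int) (hs : s ∈ pvCP root e)
    (hkids : ∀ c ∈ pvKidsP e s, pvGood root e c) : pvGood root e s := by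
  obtain ⟨p, v⟩ := s
  set R := pvRkP root e (p, v) with hR
  set l := (pvAdjA e v).filter (fun n => p != some n) with hl
  have hkid_mem : ∀ n ∈ l, ((some v, n) : Option Int × Int) ∈ pvKidsP e (p, v) := by
    intro n hn
    exact List.mem_map_of_mem hn
  have hrk : ∀ n ∈ l, pvRkP root e (some v, n) < R :=
    fun n hn => hPre.2.2.2.1 (p, v) hs _ (hkid_mem n hn)
  obtain ⟨cl, hcl, hYL⟩ := pvListGood root e v R ((pvSZP e + 1) ^ R) l
    (fun n hn => hkids _ (hkid_mem n hn))
    (fun n hn => Nat.pow_le_pow_right (Nat.succ_le_succ (Nat.zero_le _)) (hrk n hn))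
    hrk
  refine ⟨cl + 1, ?_, fun d => ?_⟩
  · have hlen : l.length ≤ pvSZP e := by
      have h1 : l.length ≤ (pvAdjA e v).length := by rw [hl]; exact List.length_filter_le _ _
      have h2 := pvAdj_len_le e v
      unfold pvSZP; omega
    have hX : 1 ≤ (pvSZP e + 1) ^ R := Nat.one_le_pow _ _ (by omega)
    calc cl + 1 ≤ l.length * ((pvSZP e + 1) ^ R) + 1 := by omega
      _ ≤ pvSZP e * ((pvSZP e + 1) ^ R) + (pvSZP e + 1) ^ R := by
          exact Nat.add_le_add (Nat.mul_le_mul_right _ hlen) hX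
      _ = (pvSZP e + 1) * ((pvSZP e + 1) ^ R) := by ring
      _ = (pvSZP e + 1) ^ (R + 1) := by rw [pow_succ]; ring
  · obtain ⟨YL, hAL, hBL⟩ := hYL (d + 1)
    refine ⟨(v, d, p) :: YL, fun f rest => ?_, fun f hf h => ?_⟩
    · have hfuel : f + (cl + 1) = (f + cl) + 1 := by omega
      rw [hfuel]
      show pvTravA e ((f + cl) + 1) ((p, v, d) :: rest) = _
      rw [pvTravA]
      rw [hAL f rest]
      rfl
    · obtain ⟨f', rfl⟩ : ∃ f', f = f' + 1 := ⟨f - 1, by omega⟩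
      have hRf : R ≤ f' := by omega
      show pvVisitB e (f' + 1) p v h = _
      rw [show ∀ f p n h, pvVisitB e (f + 1) p n h =
        (let h1 := ((pvAdjB e n).filter (fun m => p != some m)).foldl
            (fun h' c => pvVisitB e f (some n) c h') h
         let h2 := if (pvAdjB e n).length ≤ 1 then h1.insert n 0 else h1
         match p with
         | none => h2
         | some par => h2.insert par (max (1 + h2.getD n 0) (h2.getD par 0))) from fun _ _ _ _ => rfl]
      simp only [List.reverse_cons, List.foldl_append]
      rw [show pvAdjB = pvAdjA from rfl]
      rw [hBL f' hRf h]
      cases p <;> simp [pvStepA]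

theorem pvMainGood (root : Int) (e : List (Int × List Int)) (hPre : Pre_heights_py root e) :
    ∀ (N : Nat) (s : Option Int × Int), s ∈ pvCP root e → pvRkP root e s ≤ N →
      pvGood root e s := by
  intro N
  induction N with
  | zero =>
      intro s hs hrk
      refine pvStepGood root e hPre s hs (fun c hcm => absurd (hPre.2.2.2.1 s hs c hcm) ?_)
      omega
  | succ N ih =>
      intro s hs hrk
      refine pvStepGood root e hPre s hs (fun c hcm => ?_)
      exact ih c (hPre.2.1 s hs c hcm) (by have := hPre.2.2.2.1 s hs c hcm; omega)

-- ===== VERDICT (by name: the statement is the Claim_ definition above) =====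
theorem heights_py_spec : Claim_equal_heights_py := by
  intro root edges _ hPre
  unfold Spec_heights_py heights_py heights_py_alt
  have hs0 : ((none, root) : Option Int × Int) ∈ pvCP root edges := hPre.1
  have hrk0 : pvRkP root edges (none, root) ≤ pvSZP edges := hPre.2.2.2.2.1 _ hs0
  obtain ⟨c, hc, hY⟩ :=
    pvMainGood root edges hPre (pvSZP edges) (none, root) hs0 hrk0
  obtain ⟨Y, hA, hB⟩ := hY 0
  have hcF : c ≤ (pvSZA edges + 1) ^ (pvSZA edges + 2) := by
    rw [pvSZA_eq]
    refine le_trans hc (Nat.pow_le_pow_right (Nat.succ_le_succ (Nat.zero_le _)) (by omega))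
  have hsplit : (pvSZA edges + 1) ^ (pvSZA edges + 2) =
      ((pvSZA edges + 1) ^ (pvSZA edges + 2) - c) + c := (Nat.sub_add_cancel hcF).symm
  rw [hsplit]
  have hAeq := hA ((pvSZA edges + 1) ^ (pvSZA edges + 2) - c) []
  simp only at hAeq
  rw [hAeq, pvTravA_nil, List.append_nil]
  have hBeq := hB (pvSZB edges + 2) (by rw [pvSZB_eq]; omega) PySem.Dict.empty
  simp only at hBeq
  rw [hBeq]
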